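-- pv_equiv track=rewrite | github.com/gjyy00/shotput-report1 | process_data.py | find_local_maxima
-- ===== SOURCE A (Python) =====
-- def find_local_maxima(data, min_distance=10):
--     """
--     找到数据中的局部极大值点
--     min_distance: 极大值点之间的最小距离
--     """
--     maxima = []
--     n = len(data)
--
--     i = min_distance
--     while i < n - min_distance:
--         is_max = True
--         for j in range(i - min_distance, i + min_distance + 1):
--             if j != i and data[j] >= data[i]:
--                 is_max = False
--                 break
--         if is_max and data[i] > 0:
--             maxima.append(i)
--             i += min_distance
--         else:
--             i += 1
--
--     return maxima
-- ===== SOURCE B (Python) =====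
-- def _prev_ge(data):
--     """res[i] = largest j < i with data[j] >= data[i], or -1; O(n) monotonic stack."""
--     res = []
--     stack = []
--     for i in range(len(data)):
--         x = data[i]
--         while stack and data[stack[-1]] < x:
--             stack.pop()
--         res.append(stack[-1] if stack else -1)
--         stack.append(i)
--     return res
--
--
-- def find_local_maxima(data, min_distance=10):
--     n = len(data)
--     pg = _prev_ge(data)
--     pg_rev = _prev_ge(data[::-1])
--     # ng[i] = smallest j > i with data[j] >= data[i], or n
--     ng = [n - 1 - pg_rev[n - 1 - i] for i in range(n)]
--     maxima = []
--     i = min_distance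
--     while i < n - min_distance:
--         if data[i] > 0 and i - pg[i] > min_distance and ng[i] - i > min_distance:
--             maxima.append(i)
--             i += min_distance
--         else:
--             i += 1
--     return maxima
-- ===== Notes on version B (the rewrite author's own statement) =====
-- stated objective: alternative
-- what changed: B precomputes, with two O(n) monotonic-stack passes, for every index the nearest previous and next element that is >= it, so the strict-window-maximum test becomes two distance comparisons and A's inner window rescan disappears; the outer jump loop is replayed unchanged.
-- outside the precondition, e.g. on find_local_maxima([-1, -2], 0): A returns [], B returns []; on find_local_maxima([1, 2, 3], -1): A raises IndexError, B does not finish within the time limit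
import Mathlib
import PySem

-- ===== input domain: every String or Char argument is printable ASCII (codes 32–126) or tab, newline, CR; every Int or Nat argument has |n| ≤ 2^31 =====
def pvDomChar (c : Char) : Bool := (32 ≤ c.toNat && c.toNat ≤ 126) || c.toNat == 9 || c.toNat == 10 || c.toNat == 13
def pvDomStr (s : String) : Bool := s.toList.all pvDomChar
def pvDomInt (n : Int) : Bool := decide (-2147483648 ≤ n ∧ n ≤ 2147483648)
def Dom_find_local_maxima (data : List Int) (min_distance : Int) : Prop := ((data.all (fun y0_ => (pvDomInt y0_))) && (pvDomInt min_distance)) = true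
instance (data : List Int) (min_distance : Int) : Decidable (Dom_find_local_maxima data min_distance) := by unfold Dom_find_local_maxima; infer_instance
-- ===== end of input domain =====

-- B replaces A's per-candidate window rescan by two O(n) monotonic-stack passes (nearest previous/next element ≥ each sample)
-- and replays the same jump loop; alternative algorithm, not measured faster on typical data (A's break exits early).

-- ===== PORT A =====
-- data[j] (indices used by both programs are always in range on Pre_ inputs)
def pvAt (data : List Int) (i : Int) : Int := PySem.List.pyGetD data i 0

-- inner 'for j in range(...): if j != i and data[j] >= data[i]: is_max = False; break'
def scanA (data : List Int) (i : Int) : List Int → Bool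
  | [] => true
  | j :: js => if j ≠ i ∧ pvAt data j ≥ pvAt data i then false else scanA data i js

-- the while loop; fuel only makes it total (each iteration advances i by ≥ 1 when 1 ≤ md)
def loopA (data : List Int) (md : Int) : Int → List Int → Nat → List Int
  | _, acc, 0 => acc
  | i, acc, fuel+1 =>
    if i < (data.length : Int) - md then
      if scanA data i (PySem.List.pyRange (i - md) (i + md + 1) 1) && decide (pvAt data i > 0) then
        loopA data md (i + md) (acc ++ [i]) fuel
      else loopA data md (i + 1) acc fuel
    else acc

def find_local_maxima (data : List Int) (min_distance : Int) : List Int :=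
  loopA data min_distance min_distance [] (data.length + 1)

-- ===== PORT B =====
-- 'while stack and data[stack[-1]] < x: stack.pop()'  (stack head = Python stack top)
def popLt (data : List Int) (x : Int) : List Nat → List Nat
  | [] => []
  | t :: st => if data.getD t 0 < x then popLt data x st else t :: st

-- the 'for i in range(len(data))' loop of _prev_ge, recursion on the number of remaining indices
def pgAux (data : List Int) : Nat → Nat → List Nat → List Int → List Int
  | _, 0, _, res => res
  | i, rem+1, stack, res =>
    let x := data.getD i 0
    let st := popLt data x stack
    let p : Int := match st with | [] => -1 | t :: _ => (t : Int)
    pgAux data (i+1) rem (i :: st) (res ++ [p])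

def prevGe (data : List Int) : List Int := pgAux data 0 data.length [] []

-- the replay loop of B (same jump structure as A, different O(1) test); fuel only for totality
def loopB (data : List Int) (md : Int) (pg ng : List Int) : Int → List Int → Nat → List Int
  | _, acc, 0 => acc
  | i, acc, fuel+1 =>
    if i < (data.length : Int) - md then
      if decide (pvAt data i > 0) && decide (i - pvAt pg i > md) && decide (pvAt ng i - i > md) then
        loopB data md pg ng (i + md) (acc ++ [i]) fuel
      else loopB data md pg ng (i + 1) acc fuel
    else acc

def find_local_maxima_alt (data : List Int) (min_distance : Int) : List Int :=
  let n := data.length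
  let pg := prevGe data
  let pgRev := prevGe data.reverse
  let ng := (PySem.List.pyRange 0 (n : Int) 1).map (fun i => (n : Int) - 1 - pvAt pgRev ((n : Int) - 1 - i))
  loopB data min_distance pg ng min_distance [] (n + 1)

-- ===== PRECONDITION & SPEC =====
-- Pre_ excludes min_distance ≤ 0: there A's while loop stops advancing (i += min_distance), so A loops forever as soon as
-- it meets a positive sample and only ever returns the empty list otherwise; B's replay loop inherits the same divergence.
def Pre_find_local_maxima (data : List Int) (min_distance : Int) : Prop := 1 ≤ min_distance
instance (data : List Int) (min_distance : Int) : Decidable (Pre_find_local_maxima data min_distance) := by unfold Pre_find_local_maxima; infer_instance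

def pvWitness_find_local_maxima : List Int × Int := ([1, 5, 1], 1)

def Spec_find_local_maxima (data : List Int) (min_distance : Int) (out : List Int) : Prop := out = find_local_maxima_alt data min_distance
instance (data : List Int) (min_distance : Int) (out : List Int) : Decidable (Spec_find_local_maxima data min_distance out) := by unfold Spec_find_local_maxima; infer_instance

-- ===== CLAIM (what is proved, stated in full; the proofs are below) =====
def Claim_equal_find_local_maxima : Prop := ∀ (data : List Int) (min_distance : Int), Dom_find_local_maxima data min_distance → Pre_find_local_maxima data min_distance → Spec_find_local_maxima data min_distance (find_local_maxima data min_distance)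

-- ===== LEMMAS AND PROOFS =====

-- the semantic value computed by _prev_ge: largest j < i with data[j] ≥ data[i], else -1
def pgSpec (d : List Int) (i : Nat) : Int :=
  match (List.range i).reverse.find? (fun j => decide (d.getD i 0 ≤ d.getD j 0)) with
  | none => -1
  | some j => (j : Int)

-- stack invariant: j survives iff nothing after it (up to i-1) is strictly greater
def keepB (d : List Int) (i j : Nat) : Bool := decide (∀ k, k < i → j < k → d.getD k 0 ≤ d.getD j 0)

def stkSpec (d : List Int) (i : Nat) : List Nat := (List.range i).reverse.filter (keepB d i)

theorem popLt_eq_dropWhile (d : List Int) (x : Int) (st : List Nat) :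
    popLt d x st = st.dropWhile (fun t => decide (d.getD t 0 < x)) := by
  induction st with
  | nil => rfl
  | cons t st ih => simp [popLt, List.dropWhile]; split_ifs with h <;> simp [h, ih]

theorem dropWhile_eq_filter_of_pairwise {α : Type} (p : α → Bool) (M : List α)
    (h : M.Pairwise (fun a b => p b = true → p a = true)) :
    M.dropWhile p = M.filter (fun a => !p a) := by
  induction M with
  | nil => rfl
  | cons a M ih =>
    rcases List.pairwise_cons.mp h with ⟨ha, hM⟩
    by_cases hp : p a = true
    · simp [List.dropWhile, List.filter, hp, ih hM]
    · have : ∀ b ∈ M, p b = false := by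
        intro b hb
        by_contra hb'
        exact hp (ha b hb (by simpa using hb'))
      simp only [List.dropWhile, List.filter, hp, Bool.not_false]
      rw [List.filter_eq_self.mpr (by intro b hb; simp [this b hb])]

theorem keepB_succ_self (d : List Int) (i : Nat) : keepB d (i+1) i = true := by
  simp only [keepB, decide_eq_true_eq]
  intro k h1 h2; omega

theorem stkSpec_succ (d : List Int) (i : Nat) :
    stkSpec d (i+1) = i :: (List.range i).reverse.filter (keepB d (i+1)) := by
  simp [stkSpec, List.range_succ, keepB_succ_self]

theorem pop_stkSpec (d : List Int) (i : Nat) :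
    popLt d (d.getD i 0) (stkSpec d i) = (List.range i).reverse.filter (keepB d (i+1)) := by
  rw [popLt_eq_dropWhile]
  rw [dropWhile_eq_filter_of_pairwise]
  · unfold stkSpec
    rw [List.filter_filter]
    apply List.filter_congr
    intro j hj
    have hj' : j < i := by simpa using hj
    rw [Bool.eq_iff_iff]
    simp only [keepB, Bool.and_eq_true, Bool.not_eq_true', decide_eq_false_iff_not,
      decide_eq_true_eq, not_lt]
    constructor
    · rintro ⟨hle, hk⟩ k hk1 hk2
      rcases Nat.lt_or_ge k i with h | h
      · exact hk k h hk2
      · have hki : k = i := by omega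
        subst hki; exact hle
    · intro h
      exact ⟨h i (by omega) hj', fun k h1 h2 => h k (by omega) h2⟩
  · have base : ((List.range i).reverse).Pairwise (fun a b : Nat => a > b) := by
      rw [List.pairwise_reverse]; exact List.pairwise_lt_range
    refine (base.filter (keepB d i)).imp_of_mem ?_
    intro a b ha hb hab
    have hbk := (List.mem_filter.mp hb).2
    have ha' : a < i := by
      have := (List.mem_filter.mp ha).1; simpa using this
    simp only [keepB, decide_eq_true_eq] at hbk
    simp only [decide_eq_true_eq]
    intro hblt
    have hab' : d.getD a 0 ≤ d.getD b 0 := hbk a ha' hab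
    omega

theorem find_keep_eq (d : List Int) (i : Nat) : ∀ m, m ≤ i →
    (∀ k, m ≤ k → k < i → d.getD k 0 < d.getD i 0) →
    (List.range m).reverse.find? (keepB d (i+1)) =
      (List.range m).reverse.find? (fun j => decide (d.getD i 0 ≤ d.getD j 0)) := by
  intro m
  induction m with
  | zero => intro _ _; rfl
  | succ m ih =>
    intro hm hyp
    have hrev : (List.range (m+1)).reverse = m :: (List.range m).reverse := by
      simp [List.range_succ]
    rw [hrev]
    by_cases hq : d.getD i 0 ≤ d.getD m 0
    · have hk : keepB d (i+1) m = true := by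
        simp only [keepB, decide_eq_true_eq]
        intro k h1 h2
        rcases Nat.lt_or_ge k i with h | h
        · have := hyp k (by omega) h; omega
        · have hki : k = i := by omega
          subst hki; exact hq
      rw [List.find?_cons_of_pos hk, List.find?_cons_of_pos (by simpa using hq)]
    · have hk : ¬ keepB d (i+1) m = true := by
        simp only [keepB, decide_eq_true_eq]
        intro hall
        exact hq (hall i (by omega) (by omega))
      rw [List.find?_cons_of_neg hk, List.find?_cons_of_neg (by simpa using hq)]
      refine ih (by omega) ?_
      intro k h1 h2
      rcases Nat.eq_or_lt_of_le h1 with h | h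
      · have hkm : k = m := h.symm; subst hkm; omega
      · exact hyp k (by omega) h2

theorem pgSpec_nil (d : List Int) (i : Nat)
    (hF : (List.range i).reverse.filter (keepB d (i+1)) = []) : pgSpec d i = -1 := by
  have h1 : ((List.range i).reverse.filter (keepB d (i+1))).head? =
      (List.range i).reverse.find? (keepB d (i+1)) := List.head?_filter
  rw [hF, find_keep_eq d i i (le_refl i) (by intro k h1 h2; omega)] at h1
  unfold pgSpec
  rw [← h1]
  rfl

theorem pgSpec_cons (d : List Int) (i t : Nat) (ts : List Nat)
    (hF : (List.range i).reverse.filter (keepB d (i+1)) = t :: ts) : pgSpec d i = (t : Int) := by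
  have h1 : ((List.range i).reverse.filter (keepB d (i+1))).head? =
      (List.range i).reverse.find? (keepB d (i+1)) := List.head?_filter
  rw [hF, find_keep_eq d i i (le_refl i) (by intro k h1 h2; omega)] at h1
  unfold pgSpec
  rw [← h1]
  rfl

theorem pgAux_spec (d : List Int) : ∀ (rem i : Nat) (res : List Int),
    pgAux d i rem (stkSpec d i) res = res ++ (List.range' i rem).map (pgSpec d) := by
  intro rem
  induction rem with
  | zero => intro i res; simp [pgAux]
  | succ rem ih =>
    intro i res
    have hsucc := stkSpec_succ d i
    simp only [pgAux]
    rw [pop_stkSpec, List.range'_succ]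
    cases hF : (List.range i).reverse.filter (keepB d (i+1)) with
    | nil =>
      rw [hF] at hsucc
      rw [← hsucc, ih]
      simp [pgSpec_nil d i hF]
    | cons t ts =>
      rw [hF] at hsucc
      rw [← hsucc, ih]
      simp [pgSpec_cons d i t ts hF]

theorem prevGe_eq (d : List Int) : prevGe d = (List.range d.length).map (pgSpec d) := by
  have h0 : stkSpec d 0 = [] := rfl
  unfold prevGe
  rw [← h0, pgAux_spec, List.range_eq_range']
  simp


-- the two flag lists, as proof-level names (definitionally what find_local_maxima_alt builds)
def pgL (d : List Int) : List Int := (List.range d.length).map (pgSpec d)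
def ngL (d : List Int) : List Int :=
  (PySem.List.pyRange 0 (d.length : Int) 1).map
    (fun i => (d.length : Int) - 1 - pvAt (pgL d.reverse) ((d.length : Int) - 1 - i))

theorem prevGe_eq_pgL (d : List Int) : prevGe d = pgL d := prevGe_eq d

theorem find_rev_some (P : Nat → Bool) : ∀ (i j : Nat), (List.range i).reverse.find? P = some j →
    P j = true ∧ j < i ∧ ∀ k, j < k → k < i → P k = false := by
  intro i
  induction i with
  | zero => intro j h; simp at h
  | succ i ih =>
    intro j h
    rw [show (List.range (i+1)).reverse = i :: (List.range i).reverse by simp [List.range_succ]] at h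
    by_cases hP : P i = true
    · rw [List.find?_cons_of_pos hP] at h
      obtain rfl : i = j := by simpa using h
      exact ⟨hP, by omega, by intro k h1 h2; omega⟩
    · rw [List.find?_cons_of_neg hP] at h
      obtain ⟨h1, h2, h3⟩ := ih j h
      refine ⟨h1, by omega, ?_⟩
      intro k hk1 hk2
      rcases Nat.lt_or_ge k i with hk | hk
      · exact h3 k hk1 hk
      · have hki : k = i := by omega
        subst hki; simpa using hP

theorem find_rev_none (P : Nat → Bool) (i : Nat)
    (h : (List.range i).reverse.find? P = none) : ∀ k, k < i → P k = false := by
  intro k hk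
  have := List.find?_eq_none.mp h k (by simp [hk])
  simpa using this

theorem pvAt_eq_getD (d : List Int) (j : Int) (h0 : 0 ≤ j) (h1 : j < (d.length : Int)) :
    pvAt d j = d.getD j.toNat 0 := by
  unfold pvAt
  rw [PySem.List.pyGetD_eq_getElem d 0 h0 h1, List.getD_eq_getElem _ _ (by omega)]

theorem pvAt_pgL (d : List Int) (i : Int) (h0 : 0 ≤ i) (h1 : i < (d.length : Int)) :
    pvAt (pgL d) i = pgSpec d i.toNat := by
  unfold pvAt pgL
  rw [PySem.List.pyGetD_eq_getElem _ 0 h0 (by simpa using h1)]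
  simp

theorem getD_rev (d : List Int) (j : Nat) (hj : j < d.length) :
    d.reverse.getD j 0 = d.getD (d.length - 1 - j) 0 := by
  rw [List.getD_eq_getElem _ _ (by simpa using hj), List.getD_eq_getElem _ _ (by omega),
    List.getElem_reverse]

theorem pvAt_map (f : Int → Int) (n i : Int) (h0 : 0 ≤ i) (h1 : i < n) :
    pvAt ((PySem.List.pyRange 0 n 1).map f) i = f i := by
  unfold pvAt
  exact PySem.List.pyGetD_map_pyRange_of_nonneg f n i 0 h0 h1

theorem pg_cond (d : List Int) (md i : Int) (hmd : 1 ≤ md) (hi : md ≤ i)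
    (hn : i < (d.length : Int)) :
    (md < i - pgSpec d i.toNat) ↔
      (∀ k : Nat, i - md ≤ (k : Int) → (k : Int) < i → d.getD k 0 < d.getD i.toNat 0) := by
  unfold pgSpec
  cases hF : (List.range i.toNat).reverse.find?
      (fun j => decide (d.getD i.toNat 0 ≤ d.getD j 0)) with
  | none =>
    dsimp only
    have hall := find_rev_none _ _ hF
    constructor
    · intro _ k hk1 hk2
      have := hall k (by omega)
      simp only [decide_eq_false_iff_not, not_le] at this
      exact this
    · intro _; omega
  | some j =>
    dsimp only
    obtain ⟨hPj, hji, hafter⟩ := find_rev_some _ _ _ hF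
    simp only [decide_eq_true_eq] at hPj
    constructor
    · intro hlt k hk1 hk2
      rcases Nat.lt_or_ge j k with h | h
      · have := hafter k h (by omega)
        simp only [decide_eq_false_iff_not, not_le] at this
        exact this
      · exfalso; omega
    · intro hall
      by_contra hle
      have := hall j (by omega) (by omega)
      omega

theorem ng_cond (d : List Int) (md i : Int) (hmd : 1 ≤ md) (h0 : 0 ≤ i)
    (hn : i < (d.length : Int) - md) :
    (md < ((d.length : Int) - 1 - pgSpec d.reverse ((d.length : Int) - 1 - i).toNat) - i) ↔
      (∀ k : Nat, i < (k : Int) → (k : Int) ≤ i + md → d.getD k 0 < d.getD i.toNat 0) := by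
  have hlen : d.reverse.length = d.length := List.length_reverse
  have hn1 : 1 ≤ (d.length : Int) := by omega
  have hr : (((d.length : Int) - 1 - i).toNat : Int) = (d.length : Int) - 1 - i := by omega
  have hrlt : ((d.length : Int) - 1 - i).toNat < d.length := by omega
  have hdr : ∀ k : Nat, k < d.length →
      d.reverse.getD (d.length - 1 - k) 0 = d.getD k 0 := by
    intro k hk
    rw [getD_rev d (d.length - 1 - k) (by omega)]
    congr 1; omega
  have hdi : d.reverse.getD (((d.length : Int) - 1 - i).toNat) 0 = d.getD i.toNat 0 := by
    rw [getD_rev d _ (by omega)]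
    congr 1; omega
  unfold pgSpec
  rw [hlen] at *
  cases hF : (List.range (((d.length : Int) - 1 - i).toNat)).reverse.find?
      (fun j => decide (d.reverse.getD (((d.length : Int) - 1 - i).toNat) 0 ≤ d.reverse.getD j 0)) with
  | none =>
    dsimp only
    have hall := find_rev_none _ _ hF
    constructor
    · intro _ k hk1 hk2
      have hkn : k < d.length := by omega
      have hjk : d.length - 1 - k < ((d.length : Int) - 1 - i).toNat := by omega
      have := hall (d.length - 1 - k) hjk
      rw [hdi, hdr k hkn] at this
      simp only [decide_eq_false_iff_not, not_le] at this
      exact this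
    · intro _; omega
  | some j =>
    dsimp only
    obtain ⟨hPj, hji, hafter⟩ := find_rev_some _ _ _ hF
    rw [hdi, getD_rev d j (by omega)] at hPj
    simp only [decide_eq_true_eq] at hPj
    constructor
    · intro hlt k hk1 hk2
      have hkn : k < d.length := by omega
      have hjk1 : j < d.length - 1 - k := by omega
      have hjk2 : d.length - 1 - k < ((d.length : Int) - 1 - i).toNat := by omega
      have := hafter (d.length - 1 - k) hjk1 hjk2
      rw [hdi, hdr k hkn] at this
      simp only [decide_eq_false_iff_not, not_le] at this
      exact this
    · intro hall
      by_contra hle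
      have hk1 : i < ((d.length - 1 - j : Nat) : Int) := by omega
      have hk2 : ((d.length - 1 - j : Nat) : Int) ≤ i + md := by omega
      have := hall (d.length - 1 - j) hk1 hk2
      omega

theorem scanA_iff (d : List Int) (i : Int) (L : List Int) :
    scanA d i L = true ↔ ∀ j ∈ L, j ≠ i → pvAt d j < pvAt d i := by
  induction L with
  | nil => simp [scanA]
  | cons j L ih =>
    by_cases h : j ≠ i ∧ pvAt d j ≥ pvAt d i
    · simp only [scanA, if_pos h]
      constructor
      · intro hfalse; simp at hfalse
      · intro hall; exfalso
        have := hall j (by simp) h.1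
        omega
    · simp only [scanA, if_neg h, ih]
      constructor
      · intro hall k hk hki
        rcases List.mem_cons.mp hk with rfl | hk'
        · rcases not_and_or.mp h with h' | h'
          · exact absurd hki h'
          · omega
        · exact hall k hk' hki
      · intro hall k hk hki
        exact hall k (List.mem_cons_of_mem _ hk) hki

theorem cond_eq (d : List Int) (md i : Int) (hmd : 1 ≤ md) (hi : md ≤ i)
    (hn : i < (d.length : Int) - md) :
    (scanA d i (PySem.List.pyRange (i - md) (i + md + 1) 1) && decide (pvAt d i > 0)) =
    (decide (pvAt d i > 0) && decide (i - pvAt (pgL d) i > md) &&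
      decide (pvAt (ngL d) i - i > md)) := by
  have h0i : 0 ≤ i := by omega
  have hiN : i < (d.length : Int) := by omega
  have hpg : pvAt (pgL d) i = pgSpec d i.toNat := pvAt_pgL d i h0i hiN
  have hng : pvAt (ngL d) i =
      (d.length : Int) - 1 - pgSpec d.reverse ((d.length : Int) - 1 - i).toNat := by
    unfold ngL
    rw [pvAt_map _ _ _ h0i hiN]
    rw [pvAt_pgL d.reverse ((d.length : Int) - 1 - i) (by omega)
      (by rw [List.length_reverse]; omega)]
  rw [Bool.eq_iff_iff]
  simp only [Bool.and_eq_true, decide_eq_true_eq, scanA_iff, hpg, hng]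
  have hAi : pvAt d i = d.getD i.toNat 0 := pvAt_eq_getD d i h0i hiN
  constructor
  · rintro ⟨hscan, hpos⟩
    refine ⟨⟨hpos, ?_⟩, ?_⟩
    · show md < i - pgSpec d i.toNat
      rw [pg_cond d md i hmd hi hiN]
      intro k hk1 hk2
      have := hscan (k : Int) (by rw [PySem.List.mem_pyRange_one]; omega) (by omega)
      rw [pvAt_eq_getD d (k : Int) (by omega) (by omega), hAi] at this
      simpa using this
    · show md < (d.length : Int) - 1 - pgSpec d.reverse ((d.length : Int) - 1 - i).toNat - i
      rw [ng_cond d md i hmd h0i hn]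
      intro k hk1 hk2
      have := hscan (k : Int) (by rw [PySem.List.mem_pyRange_one]; omega) (by omega)
      rw [pvAt_eq_getD d (k : Int) (by omega) (by omega), hAi] at this
      simpa using this
  · rintro ⟨⟨hpos, hpg2⟩, hng2⟩
    refine ⟨?_, hpos⟩
    intro j hj hji
    rw [PySem.List.mem_pyRange_one] at hj
    have hj0 : 0 ≤ j := by omega
    rw [pvAt_eq_getD d j hj0 (by omega), hAi]
    rcases lt_or_gt_of_ne hji with h | h
    · have := (pg_cond d md i hmd hi hiN).mp hpg2 j.toNat (by omega) (by omega)
      simpa [Int.toNat_of_nonneg hj0] using this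
    · have := (ng_cond d md i hmd h0i hn).mp hng2 j.toNat (by omega) (by omega)
      simpa [Int.toNat_of_nonneg hj0] using this

theorem loops_eq (d : List Int) (md : Int) (hmd : 1 ≤ md) :
    ∀ (fuel : Nat) (i : Int) (acc : List Int), md ≤ i →
      loopA d md i acc fuel = loopB d md (pgL d) (ngL d) i acc fuel := by
  intro fuel
  induction fuel with
  | zero => intro i acc _; rfl
  | succ fuel ih =>
    intro i acc hi
    simp only [loopA, loopB]
    by_cases hcond : i < (d.length : Int) - md
    · rw [if_pos hcond, if_pos hcond, cond_eq d md i hmd hi hcond]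
      by_cases hb : (decide (pvAt d i > 0) && decide (i - pvAt (pgL d) i > md) &&
          decide (pvAt (ngL d) i - i > md)) = true
      · rw [if_pos hb, if_pos hb]
        exact ih (i + md) (acc ++ [i]) (by omega)
      · rw [if_neg hb, if_neg hb]
        exact ih (i + 1) acc (by omega)
    · rw [if_neg hcond, if_neg hcond]

-- ===== VERDICT (by name: the statement is the Claim_ definition above) =====
theorem find_local_maxima_spec : Claim_equal_find_local_maxima := by
  intro data md _ hpre
  unfold Pre_find_local_maxima at hpre
  unfold Spec_find_local_maxima find_local_maxima find_local_maxima_alt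
  simp only [prevGe_eq_pgL]
  exact loops_eq data md hpre (data.length + 1) md [] (le_refl md)
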